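-- pv_equiv track=rewrite | github.com/Maxtrix96/Programovanie2 | Python/mesto(19.10.2023 pisomka).py | axis_Y
-- ===== SOURCE A (Python) =====
-- movementsY = ["S", "J"]
--
-- def axis_Y(movements): #pohyb po osi Y
--     movement = 0
--     for move in movements:
--         if move in movementsY:
--             if move == "S":
--                 movement += 1
--             elif move == "J":
--                 movement -= 1
--     return movement
-- ===== SOURCE B (Python) =====
-- def axis_Y(movements):
--     return movements.count("S") - movements.count("J")
-- ===== Notes on version B (the rewrite author's own statement) =====
-- stated objective: simpler
-- what changed: Replaces the accumulator loop with the closed counting form movements.count("S") - movements.count("J").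
import Mathlib
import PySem

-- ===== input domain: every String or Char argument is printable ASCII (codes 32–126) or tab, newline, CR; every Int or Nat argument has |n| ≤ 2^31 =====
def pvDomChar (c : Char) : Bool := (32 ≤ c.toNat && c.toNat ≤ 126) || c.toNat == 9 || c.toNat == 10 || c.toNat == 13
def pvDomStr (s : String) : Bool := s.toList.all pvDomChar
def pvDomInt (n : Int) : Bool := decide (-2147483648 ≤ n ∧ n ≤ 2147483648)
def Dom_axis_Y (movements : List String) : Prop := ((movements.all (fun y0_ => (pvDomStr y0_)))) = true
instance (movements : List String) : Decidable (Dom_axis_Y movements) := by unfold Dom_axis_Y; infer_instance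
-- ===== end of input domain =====

-- ===== PORT A =====
-- B replaces the accumulator loop with the closed counting form count("S") - count("J") (objective: simpler).
def axis_Y (movements : List String) : Int :=
  movements.foldl (fun movement move =>
    if move ∈ ["S", "J"] then
      if move == "S" then movement + 1
      else if move == "J" then movement - 1
      else movement
    else movement) 0

-- ===== PORT B =====
def axis_Y_alt (movements : List String) : Int :=
  (PySem.List.count movements "S" : Int) - (PySem.List.count movements "J" : Int)

-- ===== PRECONDITION & SPEC =====
def Spec_axis_Y (movements : List String) (out : Int) : Prop := out = axis_Y_alt movements
instance (movements : List String) (out : Int) : Decidable (Spec_axis_Y movements out) := by unfold Spec_axis_Y; infer_instance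

-- ===== CLAIM (what is proved, stated in full; the proofs are below) =====
def Claim_equal_axis_Y : Prop := ∀ (movements : List String), Dom_axis_Y movements → Spec_axis_Y movements (axis_Y movements)

-- ===== LEMMAS AND PROOFS =====

-- ===== VERDICT (by name: the statement is the Claim_ definition above) =====
theorem axis_Y_key (movements : List String) (acc : Int) :
    movements.foldl (fun movement move =>
      if move ∈ ["S", "J"] then
        if move == "S" then movement + 1
        else if move == "J" then movement - 1
        else movement
      else movement) acc
    = acc + (PySem.List.count movements "S" : Int) - (PySem.List.count movements "J" : Int) := by
  induction movements generalizing acc with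
  | nil => simp [PySem.List.count]
  | cons h t ih =>
    rw [List.foldl_cons, ih]
    simp only [PySem.List.count, List.count_cons]
    by_cases hS : h = "S"
    · subst hS; simp; ring
    · by_cases hJ : h = "J"
      · subst hJ; simp [hS]; ring
      · simp [hS, hJ]

theorem axis_Y_spec : Claim_equal_axis_Y := by
  intro movements _
  unfold Spec_axis_Y axis_Y axis_Y_alt
  rw [axis_Y_key]; ring
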